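-- pv_equiv track=rewrite | github.com/Yan-tx/distributed-kv-manager | distributed_kv_manager/prefetch/core.py | build
-- ===== SOURCE A (Python) =====
-- from typing import Dict, List, Optional, Set, Callable
--
-- def build(candidates: List[str], budget_bytes: int, est_obj_size: int = 8 * 1024 * 1024) -> List[str]:
--     if budget_bytes <= 0:
--         return []
--     out: List[str] = []
--     spent = 0
--     for c in candidates:
--         if spent + est_obj_size > budget_bytes:
--             break
--         out.append(c)
--         spent += est_obj_size
--     return out
-- ===== SOURCE B (Python) =====
-- def build(candidates, budget_bytes, est_obj_size=8 * 1024 * 1024):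
--     if budget_bytes <= 0:
--         return []
--     if est_obj_size <= 0:
--         return list(candidates)
--     return candidates[:budget_bytes // est_obj_size]
-- ===== Notes on version B (the rewrite author's own statement) =====
-- stated objective: simpler
-- what changed: Replaced the accumulate-until-break loop with a closed-form count k = budget_bytes // est_obj_size and a slice candidates[:k] (with the same budget<=0 guard and the est_obj_size<=0 take-all case made explicit).
import Mathlib
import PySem

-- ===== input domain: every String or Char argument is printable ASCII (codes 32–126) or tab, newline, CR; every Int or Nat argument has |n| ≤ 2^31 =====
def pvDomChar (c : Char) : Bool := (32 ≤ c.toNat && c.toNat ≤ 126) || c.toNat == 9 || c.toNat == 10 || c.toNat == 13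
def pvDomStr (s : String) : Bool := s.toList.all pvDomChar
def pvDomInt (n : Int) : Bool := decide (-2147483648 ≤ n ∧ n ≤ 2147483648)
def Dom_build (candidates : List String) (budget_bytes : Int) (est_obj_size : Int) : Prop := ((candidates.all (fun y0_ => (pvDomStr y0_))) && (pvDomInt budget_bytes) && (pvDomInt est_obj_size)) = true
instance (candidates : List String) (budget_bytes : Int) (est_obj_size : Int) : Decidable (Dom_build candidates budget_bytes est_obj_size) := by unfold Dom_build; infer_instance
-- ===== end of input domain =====

-- B replaces the accumulate-until-break loop by a closed-form slice candidates[:budget//est]; simpler.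

-- ===== PORT A =====
-- the for-loop with `spent` accumulator and break
def buildLoop (cs : List String) (spent : Int) (budget_bytes est_obj_size : Int) : List String :=
  match cs with
  | [] => []
  | c :: rest =>
    if spent + est_obj_size > budget_bytes then []
    else c :: buildLoop rest (spent + est_obj_size) budget_bytes est_obj_size

def build (candidates : List String) (budget_bytes : Int) (est_obj_size : Int) : List String :=
  if budget_bytes ≤ 0 then []
  else buildLoop candidates 0 budget_bytes est_obj_size

-- ===== PORT B =====
def build_alt (candidates : List String) (budget_bytes : Int) (est_obj_size : Int) : List String :=
  if budget_bytes ≤ 0 then []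
  else if est_obj_size ≤ 0 then candidates
  -- candidates[:k] with k = budget // est ≥ 0 here: nonnegative slice = take
  else candidates.take (PySem.Int.floordiv budget_bytes est_obj_size).toNat

-- ===== PRECONDITION & SPEC =====
def Spec_build (candidates : List String) (budget_bytes : Int) (est_obj_size : Int) (out : List String) : Prop := out = build_alt candidates budget_bytes est_obj_size
instance (candidates : List String) (budget_bytes : Int) (est_obj_size : Int) (out : List String) : Decidable (Spec_build candidates budget_bytes est_obj_size out) := by unfold Spec_build; infer_instance

-- ===== CLAIM (what is proved, stated in full; the proofs are below) =====
def Claim_equal_build : Prop := ∀ (candidates : List String) (budget_bytes : Int) (est_obj_size : Int), Dom_build candidates budget_bytes est_obj_size → Spec_build candidates budget_bytes est_obj_size (build candidates budget_bytes est_obj_size)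

-- ===== LEMMAS AND PROOFS =====

-- est ≤ 0: the break never fires (spent stays ≤ 0 < budget), so the loop copies everything
theorem buildLoop_nonpos (cs : List String) (spent budget est : Int)
    (hb : 0 < budget) (he : est ≤ 0) (hs : spent ≤ 0) :
    buildLoop cs spent budget est = cs := by
  induction cs generalizing spent with
  | nil => rfl
  | cons c rest ih =>
    unfold buildLoop
    rw [if_neg (by omega)]
    rw [ih (spent + est) (by omega)]

-- est > 0: the loop takes exactly ⌊(budget - spent) / est⌋ elements
theorem buildLoop_pos (cs : List String) (spent budget est : Int) (he : 0 < est) :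
    buildLoop cs spent budget est
      = cs.take (PySem.Int.floordiv (budget - spent) est).toNat := by
  induction cs generalizing spent with
  | nil => simp [buildLoop]
  | cons c rest ih =>
    unfold buildLoop
    rw [PySem.Int.floordiv_eq_ediv_of_pos he]
    by_cases h : spent + est > budget
    · rw [if_pos h]
      have h1 : (budget - spent) / est < 1 := by
        rw [Int.ediv_lt_iff_lt_mul he]; omega
      have : ((budget - spent) / est).toNat = 0 := by omega
      simp [this]
    · rw [if_neg h]
      rw [ih (spent + est), PySem.Int.floordiv_eq_ediv_of_pos he]
      have harg : budget - (spent + est) = budget - spent - est := by ring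
      rw [harg]
      have hx : budget - spent = (budget - spent - est) + 1 * est := by ring
      have hq : (budget - spent) / est = (budget - spent - est) / est + 1 := by
        conv_lhs => rw [hx]
        exact Int.add_mul_ediv_right _ _ (by omega)
      have hnn : 0 ≤ (budget - spent - est) / est :=
        Int.ediv_nonneg (by omega) (by omega)
      have ht : ((budget - spent) / est).toNat = ((budget - spent - est) / est).toNat + 1 := by
        omega
      rw [ht, List.take_succ_cons]

-- ===== VERDICT (by name: the statement is the Claim_ definition above) =====
theorem build_spec : Claim_equal_build := by
  intro cs budget est _
  unfold Spec_build build build_alt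
  by_cases hb : budget ≤ 0
  · simp [hb]
  · rw [if_neg hb, if_neg hb]
    by_cases he : est ≤ 0
    · rw [if_pos he]
      exact buildLoop_nonpos cs 0 budget est (by omega) he le_rfl
    · rw [if_neg he]
      rw [buildLoop_pos cs 0 budget est (by omega)]
      norm_num
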